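-- pv_equiv track=rewrite | github.com/chris-arsenault/svap | backend/src/svap/dev_server.py | _resolve_route
-- ===== SOURCE A (Python) =====
-- _PARAM_ROUTES = [
--     ("GET", "/api/cases/", "GET /api/cases/{case_id}", "case_id"),
--     ("GET", "/api/taxonomy/", "GET /api/taxonomy/{quality_id}", "quality_id"),
--     ("GET", "/api/policies/", "GET /api/policies/{policy_id}", "policy_id"),
-- ]
--
-- def _resolve_route(method, path):
--     """Match a request path to a routeKey and extract path parameters."""
--     clean = path.rstrip("/")
--
--     for route_method, prefix, route_key, param_name in _PARAM_ROUTES: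
--         if method == route_method and clean.startswith(prefix.rstrip("/")):
--             # e.g. /api/cases/abc123 → segments after prefix
--             remainder = clean[len(prefix.rstrip("/")) :]
--             if remainder.startswith("/") and "/" not in remainder[1:]:
--                 return route_key, {param_name: remainder[1:]}
--
--     return f"{method} {clean}", {}
-- ===== SOURCE B (Python) =====
-- _ROUTE_TABLE = {
--     "cases": ("GET /api/cases/{case_id}", "case_id"),
--     "taxonomy": ("GET /api/taxonomy/{quality_id}", "quality_id"),
--     "policies": ("GET /api/policies/{policy_id}", "policy_id"),
-- }
--
--
-- def _resolve_route(method, path):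
--     """Match a request path to a routeKey and extract path parameters."""
--     clean = path.rstrip("/")
--
--     if method == "GET":
--         parts = clean.split("/")
--         if len(parts) == 4:
--             head, api, resource, param = parts
--             if head == "" and api == "api" and resource in _ROUTE_TABLE:
--                 route_key, param_name = _ROUTE_TABLE[resource]
--                 return route_key, {param_name: param}
--
--     return f"{method} {clean}", {}
-- ===== Notes on version B (the rewrite author's own statement) =====
-- stated objective: idiomatic
-- what changed: A scans a list of routes, testing startswith and slicing a remainder per route; B splits the cleaned path once on '/' and matches the exact shape ['', 'api', resource, param] with a single dict lookup on the resource segment.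
import Mathlib
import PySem

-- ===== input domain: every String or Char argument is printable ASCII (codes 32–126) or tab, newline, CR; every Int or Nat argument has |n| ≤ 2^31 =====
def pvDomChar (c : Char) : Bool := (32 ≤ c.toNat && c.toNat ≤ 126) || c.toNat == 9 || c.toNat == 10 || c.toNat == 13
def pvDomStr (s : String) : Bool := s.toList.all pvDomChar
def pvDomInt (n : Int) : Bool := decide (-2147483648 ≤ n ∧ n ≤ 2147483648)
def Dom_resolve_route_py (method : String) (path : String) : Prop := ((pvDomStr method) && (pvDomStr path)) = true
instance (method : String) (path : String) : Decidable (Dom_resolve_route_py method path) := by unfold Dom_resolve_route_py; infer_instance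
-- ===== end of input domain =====

-- B replaces A's per-route startswith/remainder scan by one split of the cleaned path on '/'
-- plus a dict lookup on the resource segment (idiomatic; same result, no speed claim).

-- shared helper: exact port of Python's s.rstrip("/") (drop trailing '/' characters; both Pythons call it)
def pyRstripSlash (cs : List Char) : List Char := (cs.reverse.dropWhile (· == '/')).reverse

-- ===== PORT A =====
-- _PARAM_ROUTES, literally
def pvRoutes : List (String × String × String × String) :=
  [("GET", "/api/cases/", "GET /api/cases/{case_id}", "case_id"),
   ("GET", "/api/taxonomy/", "GET /api/taxonomy/{quality_id}", "quality_id"),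
   ("GET", "/api/policies/", "GET /api/policies/{policy_id}", "policy_id")]

-- the for-loop of A: early return on a match, else continue; fall through to the default
def pvLoopA (method : String) (clean : List Char) :
    List (String × String × String × String) → String × (List (String × String))
  | [] => (method ++ " " ++ String.ofList clean, [])
  | (route_method, pre, route_key, param_name) :: rest =>
      let p := pyRstripSlash pre.toList
      if method == route_method && PySem.Chars.startswith clean p then
        let remainder := PySem.Chars.slice clean (some (p.length : Int)) none
        if PySem.Chars.startswith remainder ['/'] &&
           !PySem.Chars.isIn ['/'] (PySem.Chars.slice remainder (some 1) none) then
          (route_key, [(param_name, String.ofList (PySem.Chars.slice remainder (some 1) none))])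
        else pvLoopA method clean rest
      else pvLoopA method clean rest

def resolve_route_py (method : String) (path : String) : String × (List (String × String)) :=
  pvLoopA method (pyRstripSlash path.toList) pvRoutes

-- ===== PORT B =====
-- _ROUTE_TABLE of Source B, literally
def pvTable : PySem.Dict String (String × String) :=
  PySem.Dict.ofList
    [("cases", ("GET /api/cases/{case_id}", "case_id")),
     ("taxonomy", ("GET /api/taxonomy/{quality_id}", "quality_id")),
     ("policies", ("GET /api/policies/{policy_id}", "policy_id"))]

-- body of Source B after computing clean: one split, shape match, dict lookup
def pvAltCore (method : String) (clean : List Char) : String × (List (String × String)) :=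
  if method == "GET" then
    match PySem.Chars.splitOn clean ['/'] with
    | [head, api, resource, param] =>
        if head == ([] : List Char) && api == ['a', 'p', 'i'] then
          match pvTable.get? (String.ofList resource) with
          | some (route_key, param_name) => (route_key, [(param_name, String.ofList param)])
          | none => (method ++ " " ++ String.ofList clean, [])
        else (method ++ " " ++ String.ofList clean, [])
    | _ => (method ++ " " ++ String.ofList clean, [])
  else (method ++ " " ++ String.ofList clean, [])

def resolve_route_py_alt (method : String) (path : String) : String × (List (String × String)) :=
  pvAltCore method (pyRstripSlash path.toList)

-- ===== PRECONDITION & SPEC =====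
def Spec_resolve_route_py (method : String) (path : String) (out : String × (List (String × String))) : Prop := out = resolve_route_py_alt method path
instance (method : String) (path : String) (out : String × (List (String × String))) : Decidable (Spec_resolve_route_py method path out) := by unfold Spec_resolve_route_py; infer_instance

-- ===== CLAIM (what is proved, stated in full; the proofs are below) =====
def Claim_equal_resolve_route_py : Prop := ∀ (method : String) (path : String), Dom_resolve_route_py method path → Spec_resolve_route_py method path (resolve_route_py method path)

-- ===== LEMMAS AND PROOFS =====

-- simple recursive characterisation of str.split('/')
def pvSplitC : List Char → List (List Char)
  | [] => [[]]
  | c :: t => if c = '/' then [] :: pvSplitC t else (pvSplitC t).modifyHead (c :: ·)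

theorem pvSplitC_ne_nil (cs : List Char) : pvSplitC cs ≠ [] := by
  cases cs with
  | nil => simp [pvSplitC]
  | cons c t =>
    simp only [pvSplitC]
    split
    · simp
    · cases h : pvSplitC t with
      | nil => exact absurd h (pvSplitC_ne_nil t)
      | cons a l => simp

theorem pvSplitOn_go_spec : ∀ (fuel : Nat) (l cur : List Char) (acc : List (List Char)),
    l.length ≤ fuel →
    PySem.Chars.splitOn.go ['/'] fuel l cur acc =
      acc.reverse ++ (pvSplitC l).modifyHead (cur.reverse ++ ·) := by
  intro fuel
  induction fuel with
  | zero =>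
    intro l cur acc hl
    have : l = [] := List.length_eq_zero_iff.mp (Nat.le_zero.mp hl)
    subst this
    simp [PySem.Chars.splitOn.go, pvSplitC]
  | succ fuel ih =>
    intro l cur acc hl
    cases l with
    | nil => simp [PySem.Chars.splitOn.go, pvSplitC]
    | cons c rest =>
      by_cases hc : c = '/'
      · subst hc
        have hpre : List.isPrefixOf ['/'] ('/' :: rest) = true := by
          simp [List.isPrefixOf]
        rw [PySem.Chars.splitOn.go, if_pos hpre]
        rw [show List.drop (['/'] : List Char).length ('/' :: rest) = rest from rfl]
        rw [ih rest [] (cur.reverse :: acc) (by simpa using Nat.le_of_succ_le_succ hl)]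
        cases h : pvSplitC rest with
        | nil => exact absurd h (pvSplitC_ne_nil rest)
        | cons a t => simp [pvSplitC, h]
      · have hpre : List.isPrefixOf ['/'] (c :: rest) = false := by
          simp [List.isPrefixOf]
          exact fun h => hc h.symm
        rw [PySem.Chars.splitOn.go, if_neg (by simp [hpre])]
        rw [ih rest (c :: cur) acc (by simpa using Nat.le_of_succ_le_succ hl)]
        cases h : pvSplitC rest with
        | nil => exact absurd h (pvSplitC_ne_nil rest)
        | cons a t => simp [pvSplitC, h, hc]

theorem splitOn_eq (cs : List Char) : PySem.Chars.splitOn cs ['/'] = pvSplitC cs := by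
  have := pvSplitOn_go_spec (cs.length + 1) cs [] [] (by omega)
  rw [PySem.Chars.splitOn, this]
  cases h : pvSplitC cs with
  | nil => exact absurd h (pvSplitC_ne_nil cs)
  | cons a t => simp

theorem pvSplitC_of_not_mem {cs : List Char} (h : '/' ∉ cs) : pvSplitC cs = [cs] := by
  induction cs with
  | nil => rfl
  | cons c t ih =>
    have hc : c ≠ '/' := fun hc => h (hc ▸ List.mem_cons_self)
    have ht : '/' ∉ t := fun hm => h (List.mem_cons_of_mem _ hm)
    simp [pvSplitC, hc, ih ht]

theorem pvSplitC_append {xs : List Char} (ys : List Char) (h : '/' ∉ xs) :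
    pvSplitC (xs ++ '/' :: ys) = xs :: pvSplitC ys := by
  induction xs with
  | nil => simp [pvSplitC]
  | cons x t ih =>
    have hx : x ≠ '/' := fun hx => h (hx ▸ List.mem_cons_self)
    have ht : '/' ∉ t := fun hm => h (List.mem_cons_of_mem _ hm)
    simp [pvSplitC, hx, ih ht]

-- inversion: how a split value constrains the original string
theorem pvSplitC_inv : ∀ (cs p : List Char) (t : List (List Char)),
    pvSplitC cs = p :: t →
    '/' ∉ p ∧ ((t = [] ∧ cs = p) ∨ ∃ ys, cs = p ++ '/' :: ys ∧ pvSplitC ys = t) := by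
  intro cs
  induction cs with
  | nil =>
    intro p t h
    simp [pvSplitC] at h
    obtain ⟨hp, ht⟩ := h
    subst hp; subst ht
    exact ⟨by simp, Or.inl ⟨rfl, rfl⟩⟩
  | cons c rest ih =>
    intro p t h
    by_cases hc : c = '/'
    · subst hc
      simp [pvSplitC] at h
      obtain ⟨hp, ht⟩ := h
      subst hp
      exact ⟨by simp, Or.inr ⟨rest, by simp, ht⟩⟩
    · simp only [pvSplitC, if_neg hc] at h
      cases hrest : pvSplitC rest with
      | nil => exact absurd hrest (pvSplitC_ne_nil rest)
      | cons a l =>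
        rw [hrest, List.modifyHead_cons] at h
        injection h with hp ht
        subst hp
        obtain ⟨ha, hor⟩ := ih a l hrest
        constructor
        · intro hm
          rcases List.mem_cons.mp hm with hm | hm
          · exact hc hm.symm
          · exact ha hm
        · rcases hor with ⟨hl, hr⟩ | ⟨ys, hys, hsp⟩
          · exact Or.inl ⟨ht ▸ hl, by rw [hr]⟩
          · exact Or.inr ⟨ys, by rw [hys]; simp, ht ▸ hsp⟩

theorem singleton_infix_of_mem {c : Char} {l : List Char} (h : c ∈ l) : [c] <:+: l := by
  obtain ⟨s, t, rfl⟩ := List.append_of_mem h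
  exact ⟨s, t, by simp⟩

theorem mem_of_singleton_infix {c : Char} {l : List Char} (h : [c] <:+: l) : c ∈ l := by
  obtain ⟨s, t, rfl⟩ := h
  simp

-- the crux: A's per-route condition holds iff the split has exactly the 4-segment shape
theorem route_iff (res clean : List Char) (hres : '/' ∉ res) :
    ((['/', 'a', 'p', 'i', '/'] ++ res) <+: clean ∧
     ['/'] <+: clean.drop (5 + res.length) ∧
     ¬ (['/'] <:+: clean.drop (6 + res.length)))
    ↔ pvSplitC clean = [[], ['a', 'p', 'i'], res, clean.drop (6 + res.length)] := by
  have hlen5 : (['/', 'a', 'p', 'i', '/'] ++ res).length = 5 + res.length := by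
    simp only [List.length_append, List.length_cons, List.length_nil]; try omega
  have hlen6 : (['/', 'a', 'p', 'i', '/'] ++ res ++ ['/']).length = 6 + res.length := by
    simp only [List.length_append, List.length_cons, List.length_nil]; try omega
  constructor
  · rintro ⟨⟨t, ht⟩, h2, h3⟩
    have hd5 : clean.drop (5 + res.length) = t := by
      rw [← ht, List.drop_left' hlen5]
    rw [hd5] at h2
    obtain ⟨u, hu⟩ := h2
    have htu : t = '/' :: u := by simpa using hu.symm
    have hclean : clean = ['/', 'a', 'p', 'i', '/'] ++ res ++ '/' :: u := by
      rw [← ht, htu]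
    have hd6 : clean.drop (6 + res.length) = u := by
      rw [hclean]
      have e : ['/', 'a', 'p', 'i', '/'] ++ res ++ '/' :: u
          = (['/', 'a', 'p', 'i', '/'] ++ res ++ ['/']) ++ u := by simp
      rw [e, List.drop_left' hlen6]
    rw [hd6] at h3
    have hu' : '/' ∉ u := fun hm => h3 (singleton_infix_of_mem hm)
    rw [hd6, hclean]
    have e1 : (['/', 'a', 'p', 'i', '/'] ++ res ++ '/' :: u : List Char)
        = '/' :: (['a', 'p', 'i'] ++ '/' :: (res ++ '/' :: u)) := by simp
    rw [e1]
    have e2 : pvSplitC ('/' :: (['a', 'p', 'i'] ++ '/' :: (res ++ '/' :: u)))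
        = [] :: pvSplitC (['a', 'p', 'i'] ++ '/' :: (res ++ '/' :: u)) := rfl
    rw [e2, pvSplitC_append _ (by decide), pvSplitC_append _ hres, pvSplitC_of_not_mem hu']
  · intro h
    obtain ⟨-, hor⟩ := pvSplitC_inv clean [] _ h
    rcases hor with ⟨h1, -⟩ | ⟨ys₁, hys₁, hsp₁⟩
    · exact absurd h1 (by simp)
    obtain ⟨-, hor⟩ := pvSplitC_inv ys₁ ['a', 'p', 'i'] _ hsp₁
    rcases hor with ⟨h1, -⟩ | ⟨ys₂, hys₂, hsp₂⟩
    · exact absurd h1 (by simp)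
    obtain ⟨-, hor⟩ := pvSplitC_inv ys₂ res _ hsp₂
    rcases hor with ⟨h1, -⟩ | ⟨ys₃, hys₃, hsp₃⟩
    · exact absurd h1 (by simp)
    obtain ⟨hnd, hor⟩ := pvSplitC_inv ys₃ (clean.drop (6 + res.length)) _ hsp₃
    rcases hor with ⟨-, h3⟩ | ⟨ys₄, -, hsp₄⟩
    swap
    · exact absurd hsp₄ (pvSplitC_ne_nil ys₄)
    -- h3 : ys₃ = clean.drop (6 + res.length)
    have hclean : clean = ['/', 'a', 'p', 'i', '/'] ++ res ++ '/' :: ys₃ := by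
      rw [hys₁, hys₂, hys₃]; simp
    have hd5 : clean.drop (5 + res.length) = '/' :: ys₃ := by
      rw [hclean]
      have e : ['/', 'a', 'p', 'i', '/'] ++ res ++ '/' :: ys₃
          = (['/', 'a', 'p', 'i', '/'] ++ res) ++ '/' :: ys₃ := by simp
      rw [e, List.drop_left' hlen5]
    have hd6 : clean.drop (6 + res.length) = ys₃ := h3.symm
    refine ⟨⟨'/' :: ys₃, by simp [hclean]⟩, ?_, ?_⟩
    · rw [hd5]; exact ⟨ys₃, rfl⟩
    · rw [hd6]
      intro hin
      exact (h3 ▸ hnd) (mem_of_singleton_infix hin)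

-- boolean form of A's per-route condition (as it appears in the port)
def pvCond (res clean : List Char) : Bool :=
  PySem.Chars.startswith clean (['/', 'a', 'p', 'i', '/'] ++ res) &&
  (PySem.Chars.startswith (clean.drop (5 + res.length)) ['/'] &&
   !PySem.Chars.isIn ['/'] (clean.drop (6 + res.length)))

theorem pvCond_iff (res clean : List Char) (hres : '/' ∉ res) :
    pvCond res clean = true ↔
    pvSplitC clean = [[], ['a', 'p', 'i'], res, clean.drop (6 + res.length)] := by
  rw [← route_iff res clean hres]
  simp only [pvCond, Bool.and_eq_true, Bool.not_eq_true']
  constructor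
  · rintro ⟨h1, h2, h3⟩
    exact ⟨(PySem.Chars.startswith_iff _ _).mp h1, (PySem.Chars.startswith_iff _ _).mp h2,
      (PySem.Chars.isIn_eq_false_iff _ _).mp h3⟩
  · rintro ⟨h1, h2, h3⟩
    exact ⟨(PySem.Chars.startswith_iff _ _).mpr h1, (PySem.Chars.startswith_iff _ _).mpr h2,
      (PySem.Chars.isIn_eq_false_iff _ _).mpr h3⟩

theorem if_if_merge {α : Type} (a b : Bool) (x y : α) :
    (if a = true then (if b = true then x else y) else y)
      = (if (a && b) = true then x else y) := by
  cases a <;> cases b <;> simp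

-- unfolding the A loop over the literal route list into the three pvCond tests
theorem loopA_unfold (m : String) (cs : List Char) :
    pvLoopA m cs pvRoutes =
      if (m == "GET" && pvCond ['c', 'a', 's', 'e', 's'] cs) = true then
        ("GET /api/cases/{case_id}", [("case_id", String.ofList (cs.drop 11))])
      else if (m == "GET" && pvCond ['t', 'a', 'x', 'o', 'n', 'o', 'm', 'y'] cs) = true then
        ("GET /api/taxonomy/{quality_id}", [("quality_id", String.ofList (cs.drop 14))])
      else if (m == "GET" && pvCond ['p', 'o', 'l', 'i', 'c', 'i', 'e', 's'] cs) = true then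
        ("GET /api/policies/{policy_id}", [("policy_id", String.ofList (cs.drop 14))])
      else (m ++ " " ++ String.ofList cs, []) := by
  have e1 : pyRstripSlash "/api/cases/".toList
      = ['/', 'a', 'p', 'i', '/'] ++ ['c', 'a', 's', 'e', 's'] := by decide
  have e2 : pyRstripSlash "/api/taxonomy/".toList
      = ['/', 'a', 'p', 'i', '/'] ++ ['t', 'a', 'x', 'o', 'n', 'o', 'm', 'y'] := by decide
  have e3 : pyRstripSlash "/api/policies/".toList
      = ['/', 'a', 'p', 'i', '/'] ++ ['p', 'o', 'l', 'i', 'c', 'i', 'e', 's'] := by decide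
  simp only [pvLoopA, pvRoutes, e1, e2, e3, pvCond,
    PySem.Chars.slice_eq_listSlice, PySem.List.slice_from_natCast,
    PySem.List.slice_from_one, List.tail_drop,
    List.length_append, List.length_cons, List.length_nil,
    if_if_merge, Bool.and_assoc]
  norm_num

-- the resource strings the table knows, with the value returned
theorem pvTable_get?_inv (r : List Char) (v : String × String)
    (h : pvTable.get? (String.ofList r) = some v) :
    (r = ['c', 'a', 's', 'e', 's'] ∧ v = ("GET /api/cases/{case_id}", "case_id")) ∨
    (r = ['t', 'a', 'x', 'o', 'n', 'o', 'm', 'y'] ∧ v = ("GET /api/taxonomy/{quality_id}", "quality_id")) ∨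
    (r = ['p', 'o', 'l', 'i', 'c', 'i', 'e', 's'] ∧ v = ("GET /api/policies/{policy_id}", "policy_id")) := by
  have hkey : ∀ (s : String), String.ofList r = s → r = s.toList := by
    intro s hs
    calc r = (String.ofList r).toList := by simp
      _ = s.toList := by rw [hs]
  rw [show pvTable = PySem.Dict.mk [("cases", ("GET /api/cases/{case_id}", "case_id")),
        ("taxonomy", ("GET /api/taxonomy/{quality_id}", "quality_id")),
        ("policies", ("GET /api/policies/{policy_id}", "policy_id"))] from rfl] at h
  rw [PySem.Dict.get?_mk_cons] at h
  by_cases h1 : (("cases" : String) == String.ofList r) = true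
  · rw [if_pos h1] at h
    left
    exact ⟨hkey "cases" (eq_of_beq h1).symm, by simpa using h.symm⟩
  · rw [if_neg h1, PySem.Dict.get?_mk_cons] at h
    by_cases h2 : (("taxonomy" : String) == String.ofList r) = true
    · rw [if_pos h2] at h
      right; left
      exact ⟨hkey "taxonomy" (eq_of_beq h2).symm, by simpa using h.symm⟩
    · rw [if_neg h2, PySem.Dict.get?_mk_cons] at h
      by_cases h3 : (("policies" : String) == String.ofList r) = true
      · rw [if_pos h3] at h
        right; right
        exact ⟨hkey "policies" (eq_of_beq h3).symm, by simpa using h.symm⟩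
      · rw [if_neg h3] at h
        simp [PySem.Dict.get?] at h

-- shape of the original string when the split is a 4-list starting '', 'api'
theorem pvSplitC_four_shape (cs r p : List Char)
    (h : pvSplitC cs = [[], ['a', 'p', 'i'], r, p]) : p = cs.drop (6 + r.length) := by
  obtain ⟨-, hor⟩ := pvSplitC_inv cs [] _ h
  rcases hor with ⟨h1, -⟩ | ⟨ys₁, hys₁, hsp₁⟩
  · exact absurd h1 (by simp)
  obtain ⟨-, hor⟩ := pvSplitC_inv ys₁ ['a', 'p', 'i'] _ hsp₁
  rcases hor with ⟨h1, -⟩ | ⟨ys₂, hys₂, hsp₂⟩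
  · exact absurd h1 (by simp)
  obtain ⟨-, hor⟩ := pvSplitC_inv ys₂ r _ hsp₂
  rcases hor with ⟨h1, -⟩ | ⟨ys₃, hys₃, hsp₃⟩
  · exact absurd h1 (by simp)
  obtain ⟨-, hor⟩ := pvSplitC_inv ys₃ p _ hsp₃
  rcases hor with ⟨-, h3⟩ | ⟨ys₄, -, hsp₄⟩
  swap
  · exact absurd hsp₄ (pvSplitC_ne_nil ys₄)
  have hclean : cs = (['/', 'a', 'p', 'i', '/'] ++ r ++ ['/']) ++ ys₃ := by
    rw [hys₁, hys₂, hys₃]; simp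
  have hl : (['/', 'a', 'p', 'i', '/'] ++ r ++ ['/']).length = 6 + r.length := by
    simp only [List.length_append, List.length_cons, List.length_nil]; try omega
  rw [hclean, List.drop_left' hl, h3]

-- the B side under method "GET", with the split expressed through pvSplitC
theorem altCore_GET (cs : List Char) :
    pvAltCore "GET" cs =
      (match pvSplitC cs with
       | [head, api, resource, param] =>
           if (head == ([] : List Char) && api == ['a', 'p', 'i']) = true then
             match pvTable.get? (String.ofList resource) with
             | some (route_key, param_name) => (route_key, [(param_name, String.ofList param)])
             | none => ("GET" ++ " " ++ String.ofList cs, [])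
           else ("GET" ++ " " ++ String.ofList cs, [])
       | _ => ("GET" ++ " " ++ String.ofList cs, [])) := by
  rw [← splitOn_eq cs]
  rfl

-- core equivalence over the cleaned character list
theorem core_eq (m : String) (cs : List Char) : pvLoopA m cs pvRoutes = pvAltCore m cs := by
  rw [loopA_unfold]
  by_cases hm : m = "GET"
  swap
  · have hmb : (m == "GET") = false := by simpa using hm
    simp [pvAltCore, hmb]
  subst hm
  rw [altCore_GET]
  simp only [beq_self_eq_true, Bool.true_and]
  by_cases hC : pvCond ['c', 'a', 's', 'e', 's'] cs = true
  · have hs := (pvCond_iff _ cs (by decide)).mp hC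
    norm_num at hs
    rw [if_pos hC, hs]
    rfl
  · rw [if_neg hC]
    by_cases hT : pvCond ['t', 'a', 'x', 'o', 'n', 'o', 'm', 'y'] cs = true
    · have hs := (pvCond_iff _ cs (by decide)).mp hT
      norm_num at hs
      rw [if_pos hT, hs]
      rfl
    · rw [if_neg hT]
      by_cases hP : pvCond ['p', 'o', 'l', 'i', 'c', 'i', 'e', 's'] cs = true
      · have hs := (pvCond_iff _ cs (by decide)).mp hP
        norm_num at hs
        rw [if_pos hP, hs]
        rfl
      · rw [if_neg hP]
        -- no route matched: B's match must also fall through to the default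
        cases hsp : pvSplitC cs with
        | nil => rfl
        | cons h0 t0 =>
          cases t0 with
          | nil => rfl
          | cons h1 t1 =>
            cases t1 with
            | nil => rfl
            | cons h2 t2 =>
              cases t2 with
              | nil => rfl
              | cons h3 t3 =>
                cases t3 with
                | cons h4 t4 => rfl
                | nil =>
                  by_cases hhd : (h0 == ([] : List Char) && h1 == ['a', 'p', 'i']) = true
                  swap
                  · simp
                    intro h h'
                    exact absurd (by simp [h, h'] : (h0 == ([] : List Char) && h1 == ['a', 'p', 'i']) = true) hhd
                  have hhd' := hhd
                  rw [Bool.and_eq_true] at hhd'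
                  obtain ⟨hh0, hh1⟩ := hhd'
                  have hh0' : h0 = [] := by simpa using hh0
                  have hh1' : h1 = ['a', 'p', 'i'] := by simpa using hh1
                  subst hh0'; subst hh1'
                  cases hget : pvTable.get? (String.ofList h2) with
                  | none => simp [hget]
                  | some v =>
                    exfalso
                    have hp3 := pvSplitC_four_shape cs h2 h3 hsp
                    subst hp3
                    rcases pvTable_get?_inv h2 v hget with ⟨hr, -⟩ | ⟨hr, -⟩ | ⟨hr, -⟩ <;>
                      subst hr
                    · exact hC ((pvCond_iff _ cs (by decide)).mpr hsp)
                    · exact hT ((pvCond_iff _ cs (by decide)).mpr hsp)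
                    · exact hP ((pvCond_iff _ cs (by decide)).mpr hsp)

-- ===== VERDICT (by name: the statement is the Claim_ definition above) =====
theorem resolve_route_py_spec : Claim_equal_resolve_route_py := by
  intro method path _
  unfold Spec_resolve_route_py resolve_route_py resolve_route_py_alt
  exact core_eq method (pyRstripSlash path.toList)
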